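-- pv_equiv track=rewrite | github.com/hhc97/playground | random_code_snippets/code_archive.py | num_diffs
-- ===== SOURCE A (Python) =====
-- def num_diffs(a, b):
--     n = len(a)
--     c = [0] * n
--
--     for i in range(n):
--         c[i] = a[i] + b[i]
--
--     frequencies = dict()
--
--     for i in range(n):
--         if c[i] in frequencies.keys():
--             frequencies[c[i]] += 1
--         else:
--             frequencies[c[i]] = 1
--
--     totalPairs = 0
--
--     for x in frequencies:
--         y = frequencies[x]
--         totalPairs = (totalPairs + y * (y - 1) // 2)
--
--     return n + totalPairs
-- ===== SOURCE B (Python) =====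
-- def num_diffs(a, b):
--     seen = dict()
--     totalPairs = 0
--     for i in range(len(a)):
--         s = a[i] + b[i]
--         totalPairs += seen.get(s, 0)
--         seen[s] = seen.get(s, 0) + 1
--     return len(a) + totalPairs
-- ===== Notes on version B (the rewrite author's own statement) =====
-- stated objective: simpler
-- what changed: Replaces A's three separate passes (build a sums array, build a frequency dict, then sum y*(y-1)//2 over the dict) with a single incremental pass that adds, for each element, the number of earlier equal sums.
import Mathlib
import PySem

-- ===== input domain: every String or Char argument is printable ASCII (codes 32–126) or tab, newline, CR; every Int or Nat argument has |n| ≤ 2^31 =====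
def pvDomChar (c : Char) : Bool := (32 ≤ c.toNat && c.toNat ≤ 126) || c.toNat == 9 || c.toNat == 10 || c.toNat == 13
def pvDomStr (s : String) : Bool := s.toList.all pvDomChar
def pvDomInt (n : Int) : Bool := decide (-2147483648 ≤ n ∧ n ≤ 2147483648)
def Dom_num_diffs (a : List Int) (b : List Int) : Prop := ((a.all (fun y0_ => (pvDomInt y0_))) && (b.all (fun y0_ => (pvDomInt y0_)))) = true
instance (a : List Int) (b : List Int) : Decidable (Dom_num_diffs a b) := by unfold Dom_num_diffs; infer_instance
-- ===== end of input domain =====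

-- B replaces A's three passes (sums array, frequency dict, Σ y*(y-1)//2) by one incremental
-- pass adding, per element, the number of earlier equal sums: simpler, same O(n) cost.

-- ===== PORT A =====
-- Indexing a[i]/b[i] uses pyGetD _ _ 0: under Pre_num_diffs every index is in range, so this
-- is exact (Python raises IndexError exactly on the inputs Pre_ excludes).
def num_diffs (a : List Int) (b : List Int) : Int :=
  let n : Nat := a.length
  let c : List Int := (PySem.List.pyRange 0 (n : Int) 1).map
    (fun i => PySem.List.pyGetD a i 0 + PySem.List.pyGetD b i 0)
  let frequencies : PySem.Dict Int Int := c.foldl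
    (fun d x => if d.contains x then d.insert x (d.getD x 0 + 1) else d.insert x 1)
    PySem.Dict.empty
  -- 'y = frequencies[x]' with x drawn from frequencies' keys: the key is present, so getD _ 0 is exact
  let totalPairs : Int := frequencies.keys.foldl
    (fun t x => let y := frequencies.getD x 0; t + PySem.Int.floordiv (y * (y - 1)) 2) 0
  (n : Int) + totalPairs

-- ===== PORT B =====
def num_diffs_alt (a : List Int) (b : List Int) : Int :=
  let st := (PySem.List.pyRange 0 (a.length : Int) 1).foldl
    (fun (st : PySem.Dict Int Int × Int) i =>
      let s := PySem.List.pyGetD a i 0 + PySem.List.pyGetD b i 0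
      (st.1.insert s (st.1.getD s 0 + 1), st.2 + st.1.getD s 0))
    (PySem.Dict.empty, 0)
  (a.length : Int) + st.2

-- ===== PRECONDITION & SPEC =====
-- Pre_ excludes only the inputs with len(b) < len(a), on which Python A raises IndexError at b[i].
def Pre_num_diffs (a : List Int) (b : List Int) : Prop := a.length ≤ b.length
instance (a : List Int) (b : List Int) : Decidable (Pre_num_diffs a b) := by unfold Pre_num_diffs; infer_instance
def pvWitness_num_diffs : List Int × List Int := ([1, 2], [3, 0])

def Spec_num_diffs (a : List Int) (b : List Int) (out : Int) : Prop := out = num_diffs_alt a b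
instance (a : List Int) (b : List Int) (out : Int) : Decidable (Spec_num_diffs a b out) := by unfold Spec_num_diffs; infer_instance

-- ===== CLAIM (what is proved, stated in full; the proofs are below) =====
def Claim_equal_num_diffs : Prop := ∀ (a : List Int) (b : List Int), Dom_num_diffs a b → Pre_num_diffs a b → Spec_num_diffs a b (num_diffs a b)

-- ===== LEMMAS AND PROOFS =====

-- y*(y-1)//2 as a function, and the pair-count S c = Σ over distinct values of C2(count)
def C2 (y : Int) : Int := PySem.Int.floordiv (y * (y - 1)) 2

def S (c : List Int) : Int := ((PySem.Set.ofList c).map (fun x => C2 ((c.count x : Int)))).sum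

lemma C2_succ (k : Int) : C2 (k + 1) = C2 k + k := by
  unfold C2
  rw [PySem.Int.floordiv_eq_ediv_of_pos (by norm_num), PySem.Int.floordiv_eq_ediv_of_pos (by norm_num)]
  have h : (k + 1) * (k + 1 - 1) = k * (k - 1) + k * 2 := by ring
  rw [h, Int.add_mul_ediv_right _ _ (by norm_num)]

lemma C2_one : C2 1 = 0 := by decide

lemma sum_map_sub_single {l : List Int} (f g : Int → Int) (x : Int)
    (hnd : l.Nodup) (hx : x ∈ l) (h : ∀ y ∈ l, y ≠ x → f y = g y) :
    (l.map f).sum = (l.map g).sum + (f x - g x) := by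
  induction l with
  | nil => cases hx
  | cons y t ih =>
    rcases List.nodup_cons.mp hnd with ⟨hyt, hndt⟩
    rcases List.mem_cons.mp hx with hxy | hxt
    · subst hxy
      have : t.map f = t.map g := by
        apply List.map_congr_left
        intro z hz
        exact h z (List.mem_cons_of_mem _ hz) (fun hzx => hyt (hzx ▸ hz))
      simp only [List.map_cons, List.sum_cons, this]
      ring
    · have hyx : y ≠ x := fun hyx => hyt (hyx ▸ hxt)
      have hfy : f y = g y := h y (List.mem_cons_self) hyx
      simp only [List.map_cons, List.sum_cons, hfy,
        ih hndt hxt (fun z hz => h z (List.mem_cons_of_mem _ hz))]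
      ring

lemma ofList_append_singleton (p : List Int) (x : Int) :
    PySem.Set.ofList (p ++ [x]) = PySem.Set.add (PySem.Set.ofList p) x := by
  rw [PySem.Set.ofList_eq_foldl, PySem.Set.ofList_eq_foldl, List.foldl_append]
  rfl

lemma S_append (p : List Int) (x : Int) : S (p ++ [x]) = S p + (p.count x : Int) := by
  unfold S
  rw [ofList_append_singleton]
  by_cases hx : x ∈ p
  · have hadd : PySem.Set.add (PySem.Set.ofList p) x = PySem.Set.ofList p := by
      simp [PySem.Set.add, PySem.Set.contains, PySem.Set.mem_ofList, hx]
    rw [hadd]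
    have hmem : x ∈ PySem.Set.ofList p := (PySem.Set.mem_ofList p x).mpr hx
    rw [sum_map_sub_single (fun y => C2 (((p ++ [x]).count y : Int)))
          (fun y => C2 ((p.count y : Int))) x (PySem.Set.nodup_ofList p) hmem
          (by
            intro y _ hyx
            have hxy : x ≠ y := Ne.symm hyx
            simp [List.count_append, hxy])]
    have hcx : ((p ++ [x]).count x : Int) = (p.count x : Int) + 1 := by
      simp [List.count_append]
    rw [hcx, C2_succ]
    ring
  · have hadd : PySem.Set.add (PySem.Set.ofList p) x = PySem.Set.ofList p ++ [x] := by
      simp [PySem.Set.add, PySem.Set.contains, PySem.Set.mem_ofList, hx]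
    rw [hadd, List.map_append, List.sum_append]
    have h1 : (PySem.Set.ofList p).map (fun y => C2 (((p ++ [x]).count y : Int)))
        = (PySem.Set.ofList p).map (fun y => C2 ((p.count y : Int))) := by
      apply List.map_congr_left
      intro y hy
      have hxy : x ≠ y := fun hxy => hx (hxy ▸ (PySem.Set.mem_ofList p y).mp hy)
      simp [List.count_append, hxy]
    have hcpx : p.count x = 0 := List.count_eq_zero.mpr hx
    rw [h1]
    simp [List.count_append, hcpx, C2_one]

lemma A_freq (c : List Int) :
    c.foldl (fun d x => if d.contains x then d.insert x (d.getD x 0 + 1) else d.insert x 1)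
      PySem.Dict.empty = PySem.Dict.counter c := by
  rw [← PySem.Dict.foldl_insert_getD_add_one_eq_counter]
  apply PySem.List.foldl_congr_mem
  intro d x _
  by_cases h : d.contains x
  · simp [h]
  · have h0 : d.getD x 0 = 0 := PySem.Dict.getD_of_not_contains d 0 (by simpa using h)
    simp [h, h0]

lemma A_total (c : List Int) :
    (PySem.Dict.counter c).keys.foldl
      (fun t x => t + PySem.Int.floordiv ((PySem.Dict.counter c).getD x 0 *
        ((PySem.Dict.counter c).getD x 0 - 1)) 2) 0 = S c := by
  rw [PySem.List.foldl_add
      (g := fun x => PySem.Int.floordiv ((PySem.Dict.counter c).getD x 0 *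
        ((PySem.Dict.counter c).getD x 0 - 1)) 2)]
  simp [S, C2, PySem.Dict.keys_counter, PySem.Dict.getD_counter]

lemma counter_snoc (p : List Int) (x : Int) :
    (PySem.Dict.counter p).insert x ((PySem.Dict.counter p).getD x 0 + 1)
      = PySem.Dict.counter (p ++ [x]) := by
  rw [← PySem.Dict.foldl_insert_getD_add_one_eq_counter,
      ← PySem.Dict.foldl_insert_getD_add_one_eq_counter, List.foldl_append]
  rfl

lemma B_loop (c : List Int) : ∀ (p : List Int) (t : Int),
    (c.foldl (fun (st : PySem.Dict Int Int × Int) x =>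
        (st.1.insert x (st.1.getD x 0 + 1), st.2 + st.1.getD x 0))
      (PySem.Dict.counter p, t)).2 = t + S (p ++ c) - S p := by
  induction c with
  | nil => intro p t; simp
  | cons x xs ih =>
    intro p t
    simp only [List.foldl_cons]
    rw [counter_snoc, PySem.Dict.getD_counter]
    rw [ih (p ++ [x]) (t + (p.count x : Int))]
    rw [List.append_assoc, S_append]
    simp only [List.singleton_append]
    ring

-- ===== VERDICT (by name: the statement is the Claim_ definition above) =====
theorem num_diffs_spec : Claim_equal_num_diffs := by
  intro a b _ _
  unfold Spec_num_diffs num_diffs num_diffs_alt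
  dsimp only
  have hB := B_loop ((PySem.List.pyRange 0 (a.length : Int) 1).map
      (fun i => PySem.List.pyGetD a i 0 + PySem.List.pyGetD b i 0)) [] 0
  rw [List.foldl_map] at hB
  simp only [PySem.Dict.counter, List.foldl_nil, List.nil_append] at hB
  rw [A_freq, A_total, hB]
  simp [S]
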